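-- pv_equiv track=rewrite | github.com/arghyadeep99/minutemen-compass | backend/openai_client.py | _generate_suggested_questions
-- ===== SOURCE A (Python) =====
-- from typing import Dict, List, Any
--
-- def _generate_suggested_questions(
--
--     user_message: str,
--     tool_calls: List[Dict[str, Any]],
-- ) -> List[str]:
--     """Generate contextual suggested questions (mirrors Gemini behavior)"""
--     suggestions: List[str] = []
--
--     if any(tc.get("name") == "get_study_spots" for tc in tool_calls):
--         suggestions.extend(
--             [
--                 "What are good group study spaces?",
--                 "Where can I find quiet study spots?",
--             ]
--         )
--
--     if any(tc.get("name") == "get_dining_options" for tc in tool_calls):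
--         suggestions.extend(
--             [
--                 "What dining halls are open late?",
--                 "Where can I find vegetarian options?",
--             ]
--         )
--
--     if any(tc.get("name") == "get_support_resources" for tc in tool_calls):
--         suggestions.extend(
--             [
--                 "How do I contact academic support?",
--                 "What mental health resources are available?",
--             ]
--         )
--
--     if not suggestions:
--         suggestions = [
--             "Find a quiet study spot",
--             "What is open for food right now?",
--             "Mental health support resources",
--         ]
--
--     return suggestions[:3]
-- ===== SOURCE B (Python) =====
-- from typing import Dict, List, Any
--
-- _PAIRS = [
--     ("get_study_spots", ["What are good group study spaces?",
--                          "Where can I find quiet study spots?"]),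
--     ("get_dining_options", ["What dining halls are open late?",
--                             "Where can I find vegetarian options?"]),
--     ("get_support_resources", ["How do I contact academic support?",
--                                "What mental health resources are available?"]),
-- ]
--
-- _DEFAULTS = [
--     "Find a quiet study spot",
--     "What is open for food right now?",
--     "Mental health support resources",
-- ]
--
-- # one-time precomputation: final answer (fallback + [:3] baked in) for every 3-bit mask
-- _TABLE = []
-- for _mask in range(8):
--     _qs = [q for _i, (_n, _pair) in enumerate(_PAIRS) if (_mask >> _i) & 1 for q in _pair]
--     _TABLE.append((_qs or _DEFAULTS)[:3])
--
-- _BIT = {name: 1 << i for i, (name, _p) in enumerate(_PAIRS)}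
--
-- def _generate_suggested_questions(user_message, tool_calls):
--     mask = 0
--     for tc in tool_calls:
--         mask |= _BIT.get(tc.get("name"), 0)
--     return list(_TABLE[mask])
-- ===== Notes on version B (the rewrite author's own statement) =====
-- stated objective: alternative
-- what changed: B replaces A's three any-scans and imperative branch-by-branch suggestion building with a single fold over tool_calls computing a 3-bit presence mask, and a direct lookup into a table of all 8 possible final answers (fallback and [:3] precomputed once at import).
import Mathlib
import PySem

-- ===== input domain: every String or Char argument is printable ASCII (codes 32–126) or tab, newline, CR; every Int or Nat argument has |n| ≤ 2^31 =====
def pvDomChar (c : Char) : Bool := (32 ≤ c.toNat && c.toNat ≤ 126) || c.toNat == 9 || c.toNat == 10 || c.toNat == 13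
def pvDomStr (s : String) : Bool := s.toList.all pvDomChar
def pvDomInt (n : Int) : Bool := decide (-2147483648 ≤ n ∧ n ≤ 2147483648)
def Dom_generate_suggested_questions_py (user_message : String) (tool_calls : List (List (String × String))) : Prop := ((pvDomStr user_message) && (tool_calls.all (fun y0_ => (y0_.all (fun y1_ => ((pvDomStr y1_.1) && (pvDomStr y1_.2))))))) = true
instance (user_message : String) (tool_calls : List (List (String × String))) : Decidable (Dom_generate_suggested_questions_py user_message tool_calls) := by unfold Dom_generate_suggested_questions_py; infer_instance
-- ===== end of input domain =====

-- B replaces A's three any-scans and per-call suggestion building by one fold computing a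
-- 3-bit presence mask and a lookup into a table of all 8 possible final answers. Equal return values proved.
-- ===== PORT A =====
def generate_suggested_questions_py (user_message : String) (tool_calls : List (List (String × String))) : List String :=
  let suggestions : List String := []
  let suggestions := if tool_calls.any (fun tc => (PySem.Dict.mk tc).get? "name" == some "get_study_spots") then
      suggestions ++ ["What are good group study spaces?", "Where can I find quiet study spots?"]
    else suggestions
  let suggestions := if tool_calls.any (fun tc => (PySem.Dict.mk tc).get? "name" == some "get_dining_options") then
      suggestions ++ ["What dining halls are open late?", "Where can I find vegetarian options?"]
    else suggestions
  let suggestions := if tool_calls.any (fun tc => (PySem.Dict.mk tc).get? "name" == some "get_support_resources") then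
      suggestions ++ ["How do I contact academic support?", "What mental health resources are available?"]
    else suggestions
  let suggestions := if suggestions.isEmpty then
      ["Find a quiet study spot", "What is open for food right now?", "Mental health support resources"]
    else suggestions
  PySem.List.slice suggestions none (some 3)

-- ===== PORT B =====
def pvPairs : List (String × List String) :=
  [("get_study_spots", ["What are good group study spaces?", "Where can I find quiet study spots?"]),
   ("get_dining_options", ["What dining halls are open late?", "Where can I find vegetarian options?"]),
   ("get_support_resources", ["How do I contact academic support?", "What mental health resources are available?"])]

def pvDefaults : List String :=
  ["Find a quiet study spot", "What is open for food right now?", "Mental health support resources"]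

-- Source B's import-time loop: _TABLE[mask] = final answer for every 3-bit mask (fallback and [:3] baked in)
def pvTable : List (List String) :=
  (List.range 8).map (fun mask =>
    let qs := pvPairs.zipIdx.flatMap (fun p => if (mask >>> p.2) &&& 1 ≠ 0 then p.1.2 else [])
    PySem.List.slice (if qs.isEmpty then pvDefaults else qs) none (some 3))

-- Source B's _BIT = {name: 1 << i}
def pvBit : PySem.Dict String Nat :=
  PySem.Dict.mk (pvPairs.zipIdx.map (fun p => (p.1.1, 1 <<< p.2)))

def generate_suggested_questions_py_alt (user_message : String) (tool_calls : List (List (String × String))) : List String :=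
  let mask : Nat := tool_calls.foldl (fun m tc =>
    m ||| (match (PySem.Dict.mk tc).get? "name" with
           | some n => PySem.Dict.getD pvBit n 0
           | none => 0)) 0
  -- mask < 8 always, so Python's _TABLE[mask] never raises; getD's default is unreachable
  pvTable.getD mask []

-- ===== PRECONDITION & SPEC =====
def Spec_generate_suggested_questions_py (user_message : String) (tool_calls : List (List (String × String))) (out : List String) : Prop := out = generate_suggested_questions_py_alt user_message tool_calls
instance (user_message : String) (tool_calls : List (List (String × String))) (out : List String) : Decidable (Spec_generate_suggested_questions_py user_message tool_calls out) := by unfold Spec_generate_suggested_questions_py; infer_instance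

-- ===== CLAIM (what is proved, stated in full; the proofs are below) =====
def Claim_equal_generate_suggested_questions_py : Prop := ∀ (user_message : String) (tool_calls : List (List (String × String))), Dom_generate_suggested_questions_py user_message tool_calls → Spec_generate_suggested_questions_py user_message tool_calls (generate_suggested_questions_py user_message tool_calls)

-- ===== LEMMAS AND PROOFS =====
-- the bit contributed by one tool call
def pvG (tc : List (String × String)) : Nat :=
  match (PySem.Dict.mk tc).get? "name" with
  | some n => PySem.Dict.getD pvBit n 0
  | none => 0

theorem pv_foldl_or_init (l : List (List (String × String))) (m : Nat) :
    l.foldl (fun m tc => m ||| pvG tc) m = m ||| l.foldl (fun m tc => m ||| pvG tc) 0 := by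
  induction l generalizing m with
  | nil => simp [List.foldl]
  | cons tc rest ih =>
    simp only [List.foldl]
    rw [ih (m ||| pvG tc), ih (0 ||| pvG tc)]
    simp [Nat.or_assoc]

-- pvG as an if-chain on the three tool names
theorem pvG_eq (tc : List (String × String)) : pvG tc =
    (if (PySem.Dict.mk tc).get? "name" == some "get_study_spots" then 1 else
     if (PySem.Dict.mk tc).get? "name" == some "get_dining_options" then 2 else
     if (PySem.Dict.mk tc).get? "name" == some "get_support_resources" then 4 else 0) := by
  unfold pvG
  cases hv : (PySem.Dict.mk tc).get? "name" with
  | none => simp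
  | some n =>
    by_cases h1 : n = "get_study_spots"
    · subst h1; decide
    · by_cases h2 : n = "get_dining_options"
      · subst h2; decide
      · by_cases h3 : n = "get_support_resources"
        · subst h3; decide
        · simp only [Option.some.injEq, beq_iff_eq, h1, h2, h3, if_false]
          simp [pvBit, pvPairs, PySem.Dict.getD_eq_get?_getD,
            show ("get_study_spots" == n) = false by simp [Ne.symm h1],
            show ("get_dining_options" == n) = false by simp [Ne.symm h2],
            show ("get_support_resources" == n) = false by simp [Ne.symm h3], PySem.Dict.get?]

-- the fold computes exactly the three any-scan bits
theorem pv_mask_eq (l : List (List (String × String))) :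
    l.foldl (fun m tc => m ||| pvG tc) 0 =
      (if l.any (fun tc => (PySem.Dict.mk tc).get? "name" == some "get_study_spots") then 1 else 0) |||
      (if l.any (fun tc => (PySem.Dict.mk tc).get? "name" == some "get_dining_options") then 2 else 0) |||
      (if l.any (fun tc => (PySem.Dict.mk tc).get? "name" == some "get_support_resources") then 4 else 0) := by
  induction l with
  | nil => simp
  | cons tc rest ih =>
    simp only [List.foldl, Nat.zero_or]
    rw [pv_foldl_or_init, ih, pvG_eq]
    simp only [List.any_cons]
    by_cases g1 : ((PySem.Dict.mk tc).get? "name" == some "get_study_spots") = true <;>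
    by_cases g2 : ((PySem.Dict.mk tc).get? "name" == some "get_dining_options") = true <;>
    by_cases g3 : ((PySem.Dict.mk tc).get? "name" == some "get_support_resources") = true <;>
      simp_all <;> split_ifs <;> decide

-- ===== VERDICT (by name: the statement is the Claim_ definition above) =====
theorem generate_suggested_questions_py_spec : Claim_equal_generate_suggested_questions_py := by
  intro user_message tool_calls _
  unfold Spec_generate_suggested_questions_py generate_suggested_questions_py generate_suggested_questions_py_alt
  have hmask := pv_mask_eq tool_calls
  simp only [show (fun (m : Nat) tc =>
      m ||| (match (PySem.Dict.mk tc).get? "name" with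
             | some n => PySem.Dict.getD pvBit n 0
             | none => 0)) = (fun m tc => m ||| pvG tc) from rfl] at *
  rw [hmask]
  split_ifs <;> first | decide | simp_all
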